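-- pv_equiv track=rewrite | github.com/lancewliang/lottery_prediction | qlc/number_utils.py | check_configuration
-- ===== SOURCE A (Python) =====
-- def check_configuration(nums, config):
--     zone_ranges = [(1, 11), (12, 22), (23, 30)]
--     zone_counts = [0, 0, 0]
--     for num in nums:
--         for i, (start, end) in enumerate(zone_ranges):
--             if start <= num <= end:
--                 zone_counts[i] += 1
--                 break
--     return zone_counts == list(config)
-- ===== SOURCE B (Python) =====
-- def check_configuration(nums, config):
--     z0 = sum(1 for n in nums if 1 <= n <= 11)
--     z1 = sum(1 for n in nums if 12 <= n <= 22)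
--     z2 = sum(1 for n in nums if 23 <= n <= 30)
--     return [z0, z1, z2] == list(config)
-- ===== Notes on version B (the rewrite author's own statement) =====
-- stated objective: simpler
-- what changed: Replaces the single pass that mutates a counts array via an inner enumerate-with-break scan of the zone table by three independent counting passes over nums, one per zone (valid because the zones are disjoint).
import Mathlib
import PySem

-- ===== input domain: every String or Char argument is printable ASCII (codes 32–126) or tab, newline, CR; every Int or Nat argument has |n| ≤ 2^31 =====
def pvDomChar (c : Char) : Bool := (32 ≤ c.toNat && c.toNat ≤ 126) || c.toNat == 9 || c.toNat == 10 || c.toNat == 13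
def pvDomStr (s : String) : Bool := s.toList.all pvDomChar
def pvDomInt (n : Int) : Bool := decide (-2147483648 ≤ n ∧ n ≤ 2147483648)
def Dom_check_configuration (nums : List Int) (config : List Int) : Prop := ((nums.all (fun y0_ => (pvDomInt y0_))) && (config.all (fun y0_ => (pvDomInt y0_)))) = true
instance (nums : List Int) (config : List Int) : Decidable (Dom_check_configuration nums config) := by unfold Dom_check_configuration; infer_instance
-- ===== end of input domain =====

-- ===== PORT A =====
-- B replaces A's one pass with an inner break-scan by three independent per-zone counting passes (simpler); B does not mutate anything.
def pvZoneRanges : List (Int × Int) := [(1, 11), (12, 22), (23, 30)]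

-- inner `for i,(start,end) in enumerate(zone_ranges): if start<=num<=end: counts[i]+=1; break`
def pvAInner (num : Int) (ranges : List (Int × (Int × Int))) (counts : List Int) : List Int :=
  match ranges with
  | [] => counts
  | (i, (s, e)) :: rest =>
      if s ≤ num ∧ num ≤ e then counts.set i.toNat (counts.getD i.toNat 0 + 1)
      else pvAInner num rest counts

def check_configuration (nums : List Int) (config : List Int) : Bool :=
  (nums.foldl (fun counts num => pvAInner num (PySem.List.enumerate pvZoneRanges) counts) [0, 0, 0]) == config

-- ===== PORT B =====
def check_configuration_alt (nums : List Int) (config : List Int) : Bool :=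
  let z0 : Int := nums.foldl (fun acc n => if 1 ≤ n ∧ n ≤ 11 then acc + 1 else acc) 0
  let z1 : Int := nums.foldl (fun acc n => if 12 ≤ n ∧ n ≤ 22 then acc + 1 else acc) 0
  let z2 : Int := nums.foldl (fun acc n => if 23 ≤ n ∧ n ≤ 30 then acc + 1 else acc) 0
  [z0, z1, z2] == config

-- ===== PRECONDITION & SPEC =====
def Spec_check_configuration (nums : List Int) (config : List Int) (out : Bool) : Prop := out = check_configuration_alt nums config
instance (nums : List Int) (config : List Int) (out : Bool) : Decidable (Spec_check_configuration nums config out) := by unfold Spec_check_configuration; infer_instance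

-- ===== CLAIM (what is proved, stated in full; the proofs are below) =====
def Claim_equal_check_configuration : Prop := ∀ (nums : List Int) (config : List Int), Dom_check_configuration nums config → Spec_check_configuration nums config (check_configuration nums config)

-- ===== LEMMAS AND PROOFS =====

-- shift lemma targeted at the if-shaped start value produced by unfolding one foldl step
theorem pvCountShiftIf (p : Prop) [Decidable p] (q : Int → Prop) [DecidablePred q] (xs : List Int) :
    xs.foldl (fun acc m => if q m then acc + 1 else acc) (if p then (0:Int) + 1 else 0)
      = (if p then (1:Int) else 0) + xs.foldl (fun acc m => if q m then acc + 1 else acc) 0 := by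
  have hz : ∀ (x : Int), xs.foldl (fun acc m => if q m then acc + 1 else acc) x
      = x + xs.foldl (fun acc m => if q m then acc + 1 else acc) 0 := by
    induction xs with
    | nil => simp
    | cons r rs ihr =>
        intro x
        simp only [List.foldl_cons]
        rw [ihr, ihr (if q r then (0:Int) + 1 else 0)]
        split <;> ring
  rw [hz]
  split <;> ring

-- A's fold starting from accumulator [a,b,c] adds the three per-zone counts componentwise.
theorem pvFoldA (nums : List Int) (a b c : Int) :
    nums.foldl (fun counts num => pvAInner num (PySem.List.enumerate pvZoneRanges) counts) [a, b, c]
      = [a + nums.foldl (fun acc n => if 1 ≤ n ∧ n ≤ 11 then acc + 1 else acc) 0,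
         b + nums.foldl (fun acc n => if 12 ≤ n ∧ n ≤ 22 then acc + 1 else acc) 0,
         c + nums.foldl (fun acc n => if 23 ≤ n ∧ n ≤ 30 then acc + 1 else acc) 0] := by
  induction nums generalizing a b c with
  | nil => simp
  | cons n rest ih =>
      simp only [List.foldl_cons]
      by_cases h1 : 1 ≤ n ∧ n ≤ 11
      · have hstep : pvAInner n (PySem.List.enumerate pvZoneRanges) [a, b, c] = [a + 1, b, c] := by
          norm_num [pvAInner, PySem.List.enumerate, pvZoneRanges, h1, List.set, List.getD]
        rw [hstep, ih,
            pvCountShiftIf (1 ≤ n ∧ n ≤ 11), pvCountShiftIf (12 ≤ n ∧ n ≤ 22),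
            pvCountShiftIf (23 ≤ n ∧ n ≤ 30)]
        simp only [List.cons.injEq, and_true]
        refine ⟨by split_ifs <;> omega, by split_ifs <;> omega, by split_ifs <;> omega⟩
      · by_cases h2 : 12 ≤ n ∧ n ≤ 22
        · have hstep : pvAInner n (PySem.List.enumerate pvZoneRanges) [a, b, c] = [a, b + 1, c] := by
            norm_num [pvAInner, PySem.List.enumerate, pvZoneRanges, h1, h2, List.set, List.getD]
          rw [hstep, ih,
              pvCountShiftIf (1 ≤ n ∧ n ≤ 11), pvCountShiftIf (12 ≤ n ∧ n ≤ 22),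
              pvCountShiftIf (23 ≤ n ∧ n ≤ 30)]
          simp only [List.cons.injEq, and_true]
          refine ⟨by split_ifs <;> omega, by split_ifs <;> omega, by split_ifs <;> omega⟩
        · by_cases h3 : 23 ≤ n ∧ n ≤ 30
          · have hstep : pvAInner n (PySem.List.enumerate pvZoneRanges) [a, b, c] = [a, b, c + 1] := by
              norm_num [pvAInner, PySem.List.enumerate, pvZoneRanges, h1, h2, h3, List.set, List.getD]
              rfl
            rw [hstep, ih,
                pvCountShiftIf (1 ≤ n ∧ n ≤ 11), pvCountShiftIf (12 ≤ n ∧ n ≤ 22),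
                pvCountShiftIf (23 ≤ n ∧ n ≤ 30)]
            simp only [List.cons.injEq, and_true]
            refine ⟨by split_ifs <;> omega, by split_ifs <;> omega, by split_ifs <;> omega⟩
          · have hstep : pvAInner n (PySem.List.enumerate pvZoneRanges) [a, b, c] = [a, b, c] := by
              norm_num [pvAInner, PySem.List.enumerate, pvZoneRanges, h1, h2, h3]
            rw [hstep, ih,
                pvCountShiftIf (1 ≤ n ∧ n ≤ 11), pvCountShiftIf (12 ≤ n ∧ n ≤ 22),
                pvCountShiftIf (23 ≤ n ∧ n ≤ 30)]
            simp only [List.cons.injEq, and_true]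
            refine ⟨by split_ifs <;> omega, by split_ifs <;> omega, by split_ifs <;> omega⟩

-- ===== VERDICT (by name: the statement is the Claim_ definition above) =====
theorem check_configuration_spec : Claim_equal_check_configuration := by
  intro nums config _
  unfold Spec_check_configuration check_configuration check_configuration_alt
  rw [pvFoldA]
  simp
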